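-- pv_equiv track=rewrite | github.com/nknytk/TankaFinder | number_reader.py | number_reading
-- ===== SOURCE A (Python) =====
-- DECIMAL_DELIMITER = ('.', '記号', '記号', 'テン')
--
-- DIGIT_DELIMITER = (',', '記号', '記号', '')
--
-- NUMBER_READINGS = ['ゼロ', 'イチ', 'ニ', 'サン', 'ヨン', 'ゴ', 'ロク', 'ナナ', 'ハチ', 'キュウ']
--
-- REPEATED_DIGIT_SUFFIXES = ['', 'ジュウ', 'ヒャク', 'セン']
--
-- ONETIME_DIGIT_SUFFIXES = ['', 'マン', 'オク', 'チョウ']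
--
-- def number_reading(numbers):
--     split_numbers = numbers.split('.')
--     if not (split_numbers[0].startswith('0') and len(split_numbers[0]) > 1):
--         if len(split_numbers) == 1:
--             return read_int(split_numbers[0])
--         elif len(split_numbers) == 2:
--             return read_int(split_numbers[0]) + [DECIMAL_DELIMITER] + read_decimal(split_numbers[1])
--
--     readings = read_decimal(split_numbers[0])
--     for number_part in split_numbers[1:]:
--         readings.append(DECIMAL_DELIMITER)
--         readings += read_decimal(number_part)
--     return readings
--
-- def read_int(numbers):
--     if numbers == '0':
--         return [('0', '名詞', '数', 'ゼロ')]
--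
--     max_digit = len(numbers.replace(',', ''))
--     # 桁数が大きすぎる場合は読むのを諦めて空の配列を返す
--     if max_digit > len(ONETIME_DIGIT_SUFFIXES) * 4:
--         return []
--
--     d = 0
--     readings = []
--     for i in range(1, len(numbers) + 1):
--         c = numbers[-i]
--         if c == ',':
--             readings.insert(0, DIGIT_DELIMITER)
--             continue
--
--         char_reading = '' if c == '0' else NUMBER_READINGS[int(c)]
--         if d % 4 == 0:
--             suffix = ONETIME_DIGIT_SUFFIXES[int(d / 4)]
--         else:
--             if c == '1':
--                 char_reading = ''
--             if c == '0':
--                 suffix = ''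
--             else:
--                 suffix = REPEATED_DIGIT_SUFFIXES[int(d % 4)]
--
--         reading = char_reading + suffix
--         readings.insert(0, (c, '名詞', '数', reading))
--         d += 1
--
--     return readings
--
-- def read_decimal(numbers):
--      return [(c, '名詞', '数', NUMBER_READINGS[int(c)]) for c in numbers]
-- ===== SOURCE B (Python) =====
-- DECIMAL_DELIMITER = ('.', '記号', '記号', 'テン')
--
-- DIGIT_DELIMITER = (',', '記号', '記号', '')
--
-- NUMBER_READINGS = ['ゼロ', 'イチ', 'ニ', 'サン', 'ヨン', 'ゴ', 'ロク', 'ナナ', 'ハチ', 'キュウ']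
--
-- REPEATED_DIGIT_SUFFIXES = ['', 'ジュウ', 'ヒャク', 'セン']
--
-- ONETIME_DIGIT_SUFFIXES = ['', 'マン', 'オク', 'チョウ']
--
--
-- def number_reading(numbers):
--     parts = numbers.split('.')
--     if (parts[0].startswith('0') and len(parts[0]) > 1) or len(parts) >= 3:
--         # decimal-digits path: every part read digit by digit, parts joined by the decimal delimiter
--         out = _read_digits(parts[0])
--         for part in parts[1:]:
--             out = out + [DECIMAL_DELIMITER] + _read_digits(part)
--         return out
--     if len(parts) == 1:
--         return _read_whole(parts[0])
--     return _read_whole(parts[0]) + [DECIMAL_DELIMITER] + _read_digits(parts[1])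
--
--
-- def _read_digits(part):
--     return [(c, '名詞', '数', NUMBER_READINGS[int(c)]) for c in part]
--
--
-- def _reading(c, p, u):
--     # reading of digit c at position p (0..3) inside the 4-digit block of unit u
--     if p == 0:
--         return ('' if c == '0' else NUMBER_READINGS[int(c)]) + ONETIME_DIGIT_SUFFIXES[u]
--     if c == '0':
--         return ''
--     if c == '1':
--         return REPEATED_DIGIT_SUFFIXES[p]
--     return NUMBER_READINGS[int(c)] + REPEATED_DIGIT_SUFFIXES[p]
--
--
-- def _read_whole(s):
--     if s == '0':
--         return [('0', '名詞', '数', 'ゼロ')]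
--
--     digits = [c for c in s if c != ',']
--     if len(digits) > len(ONETIME_DIGIT_SUFFIXES) * 4:
--         return []
--
--     # split the digits into 4-digit blocks from the right (units 一/万/億/兆)
--     chunks = []
--     i = len(digits)
--     while i > 0:
--         chunks.append(digits[max(0, i - 4):i])
--         i -= 4
--
--     # read the blocks from the most significant one down
--     digit_tokens = []
--     u = len(chunks)
--     for chunk in reversed(chunks):
--         u -= 1
--         for j, c in enumerate(chunk):
--             digit_tokens.append((c, '名詞', '数', _reading(c, len(chunk) - 1 - j, u)))
--
--     # re-insert a delimiter token wherever the original string had a comma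
--     out = []
--     for c in s:
--         if c == ',':
--             out.append(DIGIT_DELIMITER)
--         else:
--             out.append(digit_tokens.pop(0))
--     return out
-- ===== Notes on version B (the rewrite author's own statement) =====
-- stated objective: alternative
-- what changed: read_int's right-to-left loop with a per-digit counter and insert(0,...) is replaced by grouping the comma-stripped digits into 4-digit blocks from the right, reading each block left-to-right with per-position/unit suffixes, and then re-inserting comma delimiter tokens in one forward pass.
import Mathlib
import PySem

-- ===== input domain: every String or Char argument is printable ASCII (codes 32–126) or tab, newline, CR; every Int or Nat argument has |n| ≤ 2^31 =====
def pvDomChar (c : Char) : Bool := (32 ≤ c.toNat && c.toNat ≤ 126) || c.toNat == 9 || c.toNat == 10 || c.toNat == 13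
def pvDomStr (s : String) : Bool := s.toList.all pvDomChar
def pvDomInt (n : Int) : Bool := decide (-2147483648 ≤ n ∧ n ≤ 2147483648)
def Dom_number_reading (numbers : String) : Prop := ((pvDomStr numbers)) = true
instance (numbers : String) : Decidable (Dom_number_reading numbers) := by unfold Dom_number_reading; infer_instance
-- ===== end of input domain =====

-- B reads the integer part by 4-digit blocks (一十百千 positions + block unit suffix) instead of A's
-- right-to-left per-digit counter with insert(0, …); same return value, alternative decomposition.

abbrev pvT4 : Type := String × String × String × String

def pvDecDelim : pvT4 := (".", "記号", "記号", "テン")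
def pvDigDelim : pvT4 := (",", "記号", "記号", "")
def pvNumReadings : List String := ["ゼロ", "イチ", "ニ", "サン", "ヨン", "ゴ", "ロク", "ナナ", "ハチ", "キュウ"]
def pvRepSuf : List String := ["", "ジュウ", "ヒャク", "セン"]
def pvOneSuf : List String := ["", "マン", "オク", "チョウ"]

-- hand port of Python's int(c) on a SINGLE character: exact on '0'..'9'; the -1 marks the
-- ValueError case (int(c) raises there; those inputs are excluded by Pre_)
def pvIntC (c : Char) : Int := if '0' ≤ c ∧ c ≤ '9' then ((c.toNat - 48 : Nat) : Int) else -1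

-- ===== PORT A =====

-- read_decimal
def pvReadDecimal (cs : List Char) : List pvT4 :=
  cs.map (fun c => (String.ofList [c], "名詞", "数", PySem.List.pyGetD pvNumReadings (pvIntC c) ""))

-- body of read_int's loop for one character c (state = (d, readings)); d ≥ 0 always, so d is a Nat
-- and Python's d % 4 / int(d / 4) are Nat mod / division
def pvStepA (st : Nat × List pvT4) (c : Char) : Nat × List pvT4 :=
  if c = ',' then (st.1, pvDigDelim :: st.2)
  else
    let charReading := if c = '0' then "" else PySem.List.pyGetD pvNumReadings (pvIntC c) ""
    if st.1 % 4 = 0 then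
      (st.1 + 1, (String.ofList [c], "名詞", "数",
        charReading ++ PySem.List.pyGetD pvOneSuf ((st.1 / 4 : Nat) : Int) "") :: st.2)
    else
      let charReading := if c = '1' then "" else charReading
      let suffix := if c = '0' then "" else PySem.List.pyGetD pvRepSuf ((st.1 % 4 : Nat) : Int) ""
      (st.1 + 1, (String.ofList [c], "名詞", "数", charReading ++ suffix) :: st.2)

-- read_int
def pvReadInt (cs : List Char) : List pvT4 :=
  if cs = ['0'] then [("0", "名詞", "数", "ゼロ")]
  else
    let maxDigit := (PySem.Chars.replace cs [','] []).length
    if pvOneSuf.length * 4 < maxDigit then []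
    else
      ((PySem.List.pyRange 1 ((cs.length : Int) + 1) 1).foldl
        (fun st i =>
          match PySem.List.pyGet? cs (-i) with
          | some c => pvStepA st c
          | none => st)   -- unreachable: 1 ≤ i ≤ len(cs), so numbers[-i] exists
        (0, [])).2

def number_reading (numbers : String) : List (String × String × String × String) :=
  let parts := PySem.Chars.splitOn numbers.toList ['.']
  let p0 := parts.headD []   -- split_numbers[0]; str.split never returns an empty list
  let fallback :=
    (parts.drop 1).foldl (fun acc part => (acc ++ [pvDecDelim]) ++ pvReadDecimal part)
      (pvReadDecimal p0)
  if ¬ (PySem.Chars.startswith p0 ['0'] = true ∧ 1 < p0.length) then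
    if parts.length = 1 then pvReadInt p0
    else if parts.length = 2 then pvReadInt p0 ++ [pvDecDelim] ++ pvReadDecimal (parts.getD 1 [])
    else fallback
  else fallback

-- ===== PORT B =====

-- _read_digits
def pvReadDigits (cs : List Char) : List pvT4 :=
  cs.map (fun c => (String.ofList [c], "名詞", "数", PySem.List.pyGetD pvNumReadings (pvIntC c) ""))

-- _reading
def pvReadingB (c : Char) (p u : Int) : String :=
  if p = 0 then
    (if c = '0' then "" else PySem.List.pyGetD pvNumReadings (pvIntC c) "") ++
      PySem.List.pyGetD pvOneSuf u ""
  else if c = '0' then ""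
  else if c = '1' then PySem.List.pyGetD pvRepSuf p ""
  else PySem.List.pyGetD pvNumReadings (pvIntC c) "" ++ PySem.List.pyGetD pvRepSuf p ""

-- the while loop building chunks; Nat subtraction i - 4 is Python's max(0, i - 4) for the slice
-- start, and a Python-negative i and i = 0 both end the loop, so the Nat counter is exact
def pvChunks (ds : List Char) (i : Nat) : List (List Char) :=
  if i = 0 then []
  else PySem.List.slice ds (some ((i - 4 : Nat) : Int)) (some ((i : Nat) : Int)) :: pvChunks ds (i - 4)
termination_by i
decreasing_by omega

-- the final loop re-inserting comma delimiters while consuming digit_tokens from the front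
def pvMerge : List Char → List pvT4 → List pvT4
  | [], _ => []
  | c :: cs, toks =>
    if c = ',' then pvDigDelim :: pvMerge cs toks
    else
      match toks with
      | t :: ts => t :: pvMerge cs ts
      | [] => []   -- digit_tokens.pop(0) on empty would raise; never reached: one token per non-comma char

-- _read_whole
def pvReadWhole (s : List Char) : List pvT4 :=
  if s = ['0'] then [("0", "名詞", "数", "ゼロ")]
  else
    let digits := s.filter (fun c => !(c == ','))
    if pvOneSuf.length * 4 < digits.length then []
    else
      let chunks := pvChunks digits digits.length
      let digitTokens :=
        (chunks.reverse.foldl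
          (fun (st : Int × List pvT4) ch =>
            (st.1 - 1,
             st.2 ++ (PySem.List.enumerate ch 0).map
               (fun jc => (String.ofList [jc.2], "名詞", "数",
                 pvReadingB jc.2 ((ch.length : Int) - 1 - jc.1) (st.1 - 1)))))
          ((chunks.length : Int), [])).2
      pvMerge s digitTokens

def number_reading_alt (numbers : String) : List (String × String × String × String) :=
  let parts := PySem.Chars.splitOn numbers.toList ['.']
  let p0 := parts.headD []
  if (PySem.Chars.startswith p0 ['0'] = true ∧ 1 < p0.length) ∨ 3 ≤ parts.length then
    (parts.drop 1).foldl (fun acc part => (acc ++ [pvDecDelim]) ++ pvReadDigits part)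
      (pvReadDigits p0)
  else if parts.length = 1 then pvReadWhole p0
  else pvReadWhole p0 ++ [pvDecDelim] ++ pvReadDigits (parts.getD 1 [])

-- ===== PRECONDITION & SPEC =====

def Pre_number_reading (numbers : String) : Prop :=
  let parts := PySem.Chars.splitOn numbers.toList ['.']
  let p0 := parts.headD []
  let decPath := (PySem.Chars.startswith p0 ['0'] && decide (1 < p0.length))
                   || decide (3 ≤ parts.length)
  (if decPath then parts.all (fun p => p.all (fun c => decide ('0' ≤ c) && decide (c ≤ '9')))
   else (p0.all (fun c => (decide ('0' ≤ c) && decide (c ≤ '9')) || c == ',')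
          || decide (16 < (p0.filter (fun c => !(c == ','))).length))
        && (parts.drop 1).all (fun p => p.all (fun c => decide ('0' ≤ c) && decide (c ≤ '9'))))
    = true

instance (numbers : String) : Decidable (Pre_number_reading numbers) := by
  unfold Pre_number_reading; infer_instance

def pvWitness_number_reading : String := "1,234.56"

def Spec_number_reading (numbers : String) (out : List (String × String × String × String)) : Prop := out = number_reading_alt numbers
instance (numbers : String) (out : List (String × String × String × String)) : Decidable (Spec_number_reading numbers out) := by unfold Spec_number_reading; infer_instance

-- ===== CLAIM (what is proved, stated in full; the proofs are below) =====
def Claim_equal_number_reading : Prop := ∀ (numbers : String), Dom_number_reading numbers → Pre_number_reading numbers → Spec_number_reading numbers (number_reading numbers)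

-- ===== LEMMAS AND PROOFS =====

-- A's token for digit/comma character c when d non-comma characters sit to its right
def pvReadA (c : Char) (d : Nat) : String :=
  if d % 4 = 0 then
    (if c = '0' then "" else PySem.List.pyGetD pvNumReadings (pvIntC c) "") ++
      PySem.List.pyGetD pvOneSuf ((d / 4 : Nat) : Int) ""
  else
    (if c = '1' then "" else if c = '0' then "" else PySem.List.pyGetD pvNumReadings (pvIntC c) "") ++
      (if c = '0' then "" else PySem.List.pyGetD pvRepSuf ((d % 4 : Nat) : Int) "")

def pvTok (c : Char) (d : Nat) : pvT4 := (String.ofList [c], "名詞", "数", pvReadA c d)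

-- reference result: left-to-right, each non-comma character read with counter
-- d + (number of non-comma characters to its right)
def pvRef (cs : List Char) (d : Nat) : List pvT4 :=
  match cs with
  | [] => []
  | c :: cs =>
    (if c = ',' then pvDigDelim else pvTok c (d + (cs.filter (fun x => !(x == ','))).length)) ::
      pvRef cs d

theorem pvStepA_comma (st : Nat × List pvT4) : pvStepA st ',' = (st.1, pvDigDelim :: st.2) := by
  simp [pvStepA]

theorem pvStepA_digit (d : Nat) (acc : List pvT4) (c : Char) (hc : c ≠ ',') :
    pvStepA (d, acc) c = (d + 1, pvTok c d :: acc) := by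
  simp only [pvStepA, pvTok, pvReadA, hc, if_false]
  split_ifs <;> simp_all

-- A's loop written as structural recursion over the reversed character list
def pvG : List Char → Nat → List pvT4
  | [], _ => []
  | c :: cs, d => if c = ',' then pvG cs d ++ [pvDigDelim] else pvG cs (d + 1) ++ [pvTok c d]

theorem pvFold_eq_pvG (l : List Char) : ∀ (d : Nat) (acc : List pvT4),
    (l.foldl pvStepA (d, acc)).2 = pvG l d ++ acc := by
  induction l with
  | nil => intro d acc; simp [pvG]
  | cons c l ih =>
    intro d acc
    by_cases hc : c = ','
    · subst hc; simp only [List.foldl_cons, pvStepA_comma, pvG, ih]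
      simp
    · simp only [List.foldl_cons, pvStepA_digit d acc c hc, pvG, if_neg hc, ih]
      simp

theorem pvRef_append (xs : List Char) (c : Char) : ∀ d : Nat,
    pvRef (xs ++ [c]) d =
      pvRef xs (d + if c = ',' then 0 else 1) ++
        [if c = ',' then pvDigDelim else pvTok c d] := by
  induction xs with
  | nil => intro d; by_cases hc : c = ',' <;> simp [pvRef, hc]
  | cons x xs ih =>
    intro d
    simp only [List.cons_append, pvRef, ih, List.filter_append]
    by_cases hc : c = ',' <;>
      simp [hc, Nat.add_comm, Nat.add_assoc]

theorem pvG_eq_pvRef (l : List Char) : ∀ d : Nat, pvG l d = pvRef l.reverse d := by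
  induction l with
  | nil => intro d; simp [pvG, pvRef]
  | cons c l ih =>
    intro d
    by_cases hc : c = ','
    · simp [pvG, hc, ih, pvRef_append]
    · simp [pvG, hc, ih, pvRef_append]

theorem pvPyGet_neg (cs : List Char) (k : Nat) (h : k < cs.length) :
    PySem.List.pyGet? cs (-((k:Int)+1)) = some (cs.reverse[k]'(by simpa using h)) := by
  have h1 : ¬ (0 ≤ -((k:Int)+1)) := by omega
  have h2 : -((cs.length:Int)) ≤ -((k:Int)+1) := by omega
  simp only [PySem.List.pyGet?, PySem.List.pyIdx?, if_neg h1, if_pos h2]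
  have h3 : (-(-((k:Int)+1))).toNat = k + 1 := by omega
  rw [h3]
  simp only [Option.bind_some]
  rw [List.getElem_reverse]
  rw [List.getElem?_eq_getElem (by omega)]
  congr 2
  omega

-- the pyRange 1 (n+1) loop over numbers[-i] is the fold over the reversed list
theorem pvRange_fold (cs : List Char) : ∀ (m k : Nat), k + m = cs.length → ∀ st : Nat × List pvT4,
    (PySem.List.pyRange ((k : Int) + 1) ((cs.length : Int) + 1) 1).foldl
      (fun st i =>
        match PySem.List.pyGet? cs (-i) with
        | some c => pvStepA st c
        | none => st) st
    = (cs.reverse.drop k).foldl pvStepA st := by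
  intro m
  induction m with
  | zero =>
    intro k hk st
    have h1 : PySem.List.pyRange ((k : Int) + 1) ((cs.length : Int) + 1) 1 = [] := by
      simp [PySem.List.pyRange]; omega
    have h2 : cs.reverse.drop k = [] := by
      apply List.drop_eq_nil_of_le; simp; omega
    rw [h1, h2]; rfl
  | succ m ih =>
    intro k hk st
    have hklt : k < cs.length := by omega
    have hcons : PySem.List.pyRange ((k : Int) + 1) ((cs.length : Int) + 1) 1
        = ((k : Int) + 1) :: PySem.List.pyRange ((k : Int) + 1 + 1) ((cs.length : Int) + 1) 1 :=
      PySem.List.pyRange_one_cons (by omega)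
    rw [hcons, List.foldl_cons]
    have hdrop : cs.reverse.drop k
        = cs.reverse[k]'(by simpa using hklt) :: cs.reverse.drop (k+1) :=
      List.drop_eq_getElem_cons (by simpa using hklt)
    rw [hdrop, List.foldl_cons]
    have hcast : (k : Int) + 1 + 1 = ((k + 1 : Nat) : Int) + 1 := by push_cast [List.length_cons]; ring
    rw [pvPyGet_neg cs k hklt, hcast]
    exact ih (k+1) (by omega) _

theorem pvReadInt_eq_ref (cs : List Char) (h0 : cs ≠ ['0'])
    (hlen : ¬ pvOneSuf.length * 4 < (PySem.Chars.replace cs [','] []).length) :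
    pvReadInt cs = pvRef cs 0 := by
  unfold pvReadInt
  rw [if_neg h0]
  simp only [if_neg hlen]
  have h1 := pvRange_fold cs cs.length 0 (by omega) (0, [])
  simp only [Nat.cast_zero, zero_add, List.drop_zero] at h1
  rw [h1, pvFold_eq_pvG, pvG_eq_pvRef, List.reverse_reverse]
  simp

-- B's tokens
def pvT : List Char → Nat → List pvT4
  | [], _ => []
  | c :: ds, k => pvTok c (ds.length + 4 * k) :: pvT ds k

theorem pvReadingB_eq (c : Char) (p u : Nat) (hp : p < 4) :
    pvReadingB c (p : Int) (u : Int) = pvReadA c (p + 4 * u) := by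
  have hmod : (p + 4 * u) % 4 = p := by omega
  have hdiv : (p + 4 * u) / 4 = u := by omega
  unfold pvReadingB pvReadA
  rw [hmod, hdiv]
  by_cases hp0 : p = 0
  · subst hp0; simp
  · rw [if_neg (by exact_mod_cast hp0), if_neg hp0]
    by_cases h0 : c = '0'
    · simp [h0]
    · by_cases h1 : c = '1' <;> simp [h0, h1]

theorem pvReplaceGo (fuel : Nat) : ∀ (l acc : List Char), l.length ≤ fuel →
    PySem.Chars.replace.go [','] [] fuel l acc
      = acc.reverse ++ l.filter (fun c => !(c == ',')) := by
  induction fuel with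
  | zero =>
    intro l acc h
    have hl : l = [] := by cases l <;> simp_all
    subst hl; simp [PySem.Chars.replace.go]
  | succ fuel ih =>
    intro l acc h
    cases l with
    | nil => simp [PySem.Chars.replace.go]
    | cons c t =>
      by_cases hc : c = ','
      · subst hc
        have : PySem.Chars.replace.go [','] [] (fuel+1) (','::t) acc
            = PySem.Chars.replace.go [','] [] fuel t acc := by
          simp [PySem.Chars.replace.go, List.isPrefixOf]
        rw [this, ih t acc (by simpa using h)]
        simp
      · have : PySem.Chars.replace.go [','] [] (fuel+1) (c::t) acc
            = PySem.Chars.replace.go [','] [] fuel t (c :: acc) := by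
          simp only [PySem.Chars.replace.go, List.isPrefixOf]
          simp [hc]
          intro h'
          exact absurd h'.symm hc
        rw [this, ih t (c :: acc) (by simpa using h)]
        simp [hc]

theorem pvReplace_comma (cs : List Char) :
    PySem.Chars.replace cs [','] [] = cs.filter (fun c => !(c == ',')) := by
  unfold PySem.Chars.replace
  simp only [List.isEmpty_cons, Bool.false_eq_true, if_false]
  exact pvReplaceGo cs.length cs [] le_rfl

theorem pvChunks_take (i : Nat) : ∀ ds : List Char, i ≤ ds.length →
    pvChunks ds i = pvChunks (ds.take i) i := by
  induction i using Nat.strong_induction_on with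
  | _ i ih =>
    intro ds hi
    by_cases h0 : i = 0
    · subst h0; simp [pvChunks]
    · conv_lhs => rw [pvChunks]
      conv_rhs => rw [pvChunks]
      rw [if_neg h0, if_neg h0]
      congr 1
      · rw [PySem.List.slice_natCast, PySem.List.slice_natCast]
        rw [List.drop_take]
        rw [List.take_take]
        congr 1
        omega
      · rw [ih (i - 4) (by omega) ds (by omega)]
        rw [ih (i - 4) (by omega) (ds.take i) (by simp; omega)]
        rw [List.take_take]
        have hmin : min (i - 4) i = i - 4 := by omega
        rw [hmin]

theorem pvT_append (b : List Char) (hb : b.length = 4) : ∀ (a : List Char) (k : Nat),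
    pvT (a ++ b) k = pvT a (k + 1) ++ pvT b k := by
  intro a
  induction a with
  | nil => intro k; simp [pvT]
  | cons c t ih =>
    intro k
    simp only [List.cons_append, pvT, ih, List.length_append, hb]
    have : t.length + 4 + 4 * k = t.length + 4 * (k + 1) := by ring
    rw [this]

theorem pvEnumShift {α : Type} (t : List α) : ∀ s : Int,
    PySem.List.enumerate t (s + 1) = (PySem.List.enumerate t s).map (fun p => (p.1 + 1, p.2)) := by
  induction t with
  | nil => intro s; simp [PySem.List.enumerate]
  | cons c t ih =>
    intro s
    simp only [PySem.List.enumerate, List.map_cons]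
    rw [show s + 1 + 1 = (s + 1) + 1 from rfl, ih (s + 1)]

theorem pvEnumTok (ch : List Char) (hch : ch.length ≤ 4) (k : Nat) :
    (PySem.List.enumerate ch 0).map
      (fun jc => (String.ofList [jc.2], "名詞", "数",
        pvReadingB jc.2 ((ch.length : Int) - 1 - jc.1) ((k : Nat) : Int)))
    = pvT ch k := by
  induction ch with
  | nil => simp [PySem.List.enumerate, pvT]
  | cons c t ih =>
    have ht4 : t.length < 4 := by simpa using hch
    simp only [PySem.List.enumerate]
    rw [pvEnumShift t 0]
    simp only [List.map_cons, List.map_map]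
    congr 1
    · have harg : (((c :: t).length : Int)) - 1 - 0 = (t.length : Int) := by push_cast [List.length_cons]; ring
      rw [harg, pvReadingB_eq c t.length k (by omega)]
      simp [pvTok]
    · refine (List.map_congr_left ?_).trans (ih (by omega))
      intro a _
      simp only [Function.comp]
      have harg : (((c :: t).length : Int)) - 1 - (a.1 + 1) = (t.length : Int) - 1 - a.1 := by
        push_cast [List.length_cons]; ring
      rw [harg]

theorem pvChunkFold (n : Nat) : ∀ (ds : List Char), ds.length = n → ∀ (k : Nat) (acc : List pvT4),
    ((pvChunks ds ds.length).reverse.foldl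
      (fun (st : Int × List pvT4) ch =>
        (st.1 - 1,
         st.2 ++ (PySem.List.enumerate ch 0).map
           (fun jc => (String.ofList [jc.2], "名詞", "数",
             pvReadingB jc.2 ((ch.length : Int) - 1 - jc.1) (st.1 - 1)))))
      (((pvChunks ds ds.length).length : Int) + (k : Int), acc))
    = ((k : Int), acc ++ pvT ds k) := by
  induction n using Nat.strong_induction_on with
  | _ n ih =>
    intro ds hds k acc
    by_cases h0 : n = 0
    · subst h0
      have hnil : ds = [] := List.eq_nil_of_length_eq_zero hds
      subst hnil
      simp [pvChunks, pvT]
    · have hchunk : pvChunks ds ds.length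
          = (ds.drop (ds.length - 4)).take (ds.length - (ds.length - 4))
              :: pvChunks ds (ds.length - 4) := by
        rw [pvChunks, if_neg (by omega), PySem.List.slice_natCast]
      by_cases hsmall : n ≤ 4
      · -- a single chunk: the whole digit list with unit 0 + k
        have h40 : ds.length - 4 = 0 := by omega
        rw [hchunk, h40]
        simp only [List.drop_zero, Nat.sub_zero, List.take_length]
        have hnilc : pvChunks ds 0 = [] := by simp [pvChunks]
        rw [hnilc]
        simp only [List.reverse_cons, List.reverse_nil, List.nil_append, List.foldl_cons,
          List.foldl_nil, List.length_cons, List.length_nil]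
        have hu : ((0 + 1 : Nat) : Int) + (k : Int) - 1 = ((k : Nat) : Int) := by push_cast; ring
        rw [hu, pvEnumTok ds (by omega) k]
      · -- peel the least-significant 4-digit chunk
        have hlast : (ds.drop (ds.length - 4)).length = 4 := by simp [hds]; omega
        have htake : (ds.drop (ds.length - 4)).take (ds.length - (ds.length - 4))
            = ds.drop (ds.length - 4) := by
          apply List.take_of_length_le
          rw [hlast]; omega
        rw [hchunk, htake, pvChunks_take (ds.length - 4) ds (by omega)]
        set front := ds.take (ds.length - 4) with hfront
        have hfl : front.length = ds.length - 4 := by rw [hfront]; simp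
        rw [← hfl]
        set last := ds.drop front.length with hlastdef
        have hlast4 : last.length = 4 := by rw [hlastdef, hfl]; exact hlast
        rw [List.reverse_cons, List.foldl_append]
        have hinit : (((last :: pvChunks front front.length).length : Int)) + (k : Int)
            = ((pvChunks front front.length).length : Int) + ((k + 1 : Nat) : Int) := by
          push_cast [List.length_cons]; ring
        rw [hinit]
        rw [ih (n - 4) (by omega) front (by rw [hfl, hds]) (k + 1) acc]
        simp only [List.foldl_cons, List.foldl_nil]
        have hu : (((k + 1 : Nat) : Int)) - 1 = ((k : Nat) : Int) := by push_cast; ring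
        rw [hu, pvEnumTok last (by rw [hlast4]) k]
        have hsplit : pvT front (k + 1) ++ pvT last k = pvT ds k := by
          rw [← pvT_append last hlast4 front k]
          congr 1
          rw [hlastdef, hfl, hfront]
          exact List.take_append_drop _ ds
        rw [List.append_assoc, hsplit]

theorem pvMerge_eq_ref (cs : List Char) :
    pvMerge cs (pvT (cs.filter (fun c => !(c == ','))) 0) = pvRef cs 0 := by
  induction cs with
  | nil => simp [pvMerge, pvRef]
  | cons c cs ih =>
    by_cases hc : c = ','
    · subst hc
      rw [List.filter_cons_of_neg (by simp)]
      simp only [pvMerge, pvRef, if_pos]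
      rw [ih]
    · rw [List.filter_cons_of_pos (by simp [hc])]
      simp only [pvT, pvMerge, if_neg hc, pvRef]
      rw [ih]
      have : (cs.filter (fun c => !(c == ','))).length + 4 * 0
          = 0 + (cs.filter (fun c => !(c == ','))).length := by omega
      rw [this]

theorem pvReadWhole_eq (cs : List Char) : pvReadWhole cs = pvReadInt cs := by
  by_cases h0 : cs = ['0']
  · simp [pvReadWhole, pvReadInt, h0]
  · by_cases hg : pvOneSuf.length * 4 < (cs.filter (fun c => !(c == ','))).length
    · rw [pvReadWhole, if_neg h0, pvReadInt, if_neg h0]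
      simp only [pvReplace_comma]
      rw [if_pos hg, if_pos hg]
    · rw [pvReadWhole, if_neg h0]
      simp only [if_neg hg]
      rw [pvReadInt_eq_ref cs h0 (by rw [pvReplace_comma]; exact hg)]
      have hfold := pvChunkFold (cs.filter (fun c => !(c == ','))).length
        (cs.filter (fun c => !(c == ','))) rfl 0 []
      simp only [Nat.cast_zero, add_zero, List.nil_append] at hfold
      rw [hfold]
      exact pvMerge_eq_ref cs

theorem pvSplitOnGo_ne_nil (sep : List Char) (fuel : Nat) : ∀ (l cur : List Char)
    (acc : List (List Char)), PySem.Chars.splitOn.go sep fuel l cur acc ≠ [] := by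
  induction fuel with
  | zero => intro l cur acc; simp [PySem.Chars.splitOn.go]
  | succ fuel ih =>
    intro l cur acc
    cases l with
    | nil => simp [PySem.Chars.splitOn.go]
    | cons c t =>
      rw [PySem.Chars.splitOn.go]
      split
      · exact ih _ _ _
      · exact ih _ _ _

theorem pvSplitOn_ne_nil (s sep : List Char) : PySem.Chars.splitOn s sep ≠ [] := by
  unfold PySem.Chars.splitOn
  exact pvSplitOnGo_ne_nil sep (s.length + 1) s [] []

theorem pvReadDigits_eq : pvReadDigits = pvReadDecimal := rfl

-- ===== VERDICT (by name: the statement is the Claim_ definition above) =====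
theorem number_reading_spec : Claim_equal_number_reading := by
  intro numbers hdom hpre
  unfold Spec_number_reading
  simp only [number_reading, number_reading_alt, pvReadDigits_eq]
  set parts := PySem.Chars.splitOn numbers.toList ['.'] with hpartsdef
  obtain ⟨p0, rest, hcons⟩ : ∃ h t, parts = h :: t := by
    cases hp : parts with
    | nil => exact absurd hp (hpartsdef ▸ pvSplitOn_ne_nil numbers.toList ['.'])
    | cons a t => exact ⟨a, t, rfl⟩
  by_cases hP : (PySem.Chars.startswith (parts.headD []) ['0'] = true ∧ 1 < (parts.headD []).length)
  · rw [if_neg (not_not_intro hP), if_pos (Or.inl hP)]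
  · rw [if_pos hP]
    by_cases hL1 : parts.length = 1
    · rw [if_pos hL1, if_neg (by rw [hL1]; rintro (h | h); exact hP h; omega), if_pos hL1]
      exact (pvReadWhole_eq _).symm
    · by_cases hL2 : parts.length = 2
      · rw [if_neg hL1, if_pos hL2, if_neg (by rw [hL2]; rintro (h | h); exact hP h; omega),
          if_neg hL1]
        rw [pvReadWhole_eq]
      · have hlen1 : parts.length = rest.length + 1 := by rw [hcons]; rfl
        have hL3 : 3 ≤ parts.length := by omega
        rw [if_neg hL1, if_neg hL2, if_pos (Or.inr hL3)]
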